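-- pv_equiv track=rewrite | github.com/legend048/Compiler-Constrution | 3_count_whitespace_next_line.py | count_whitespace_and_newlines
-- ===== SOURCE A (Python) =====
-- def count_whitespace_and_newlines(input_string):
--     lines = input_string.split('\n')
--     indent_count = 0
--     whitespace_count = 0
--     newline_count = 0
--     for line in lines:
--         leading_whitespace = len(line) - len(line.lstrip())
--         indent_count += leading_whitespace
--
--         cleaned_line = line.lstrip()
--         for char in cleaned_line:
--             if char == ' ' or char == '\t':
--                 whitespace_count += 1
--     newline_count = input_string.count('\n')
--     return indent_count, whitespace_count, newline_count
-- ===== SOURCE B (Python) =====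
-- def count_whitespace_and_newlines(input_string):
--     indent_count = 0
--     whitespace_count = 0
--     newline_count = 0
--     in_leading = True
--     for char in input_string:
--         if char == '\n':
--             newline_count += 1
--             in_leading = True
--         elif in_leading and char.isspace():
--             indent_count += 1
--         else:
--             in_leading = False
--             if char == ' ' or char == '\t':
--                 whitespace_count += 1
--     return indent_count, whitespace_count, newline_count
-- ===== Notes on version B (the rewrite author's own statement) =====
-- stated objective: alternative
-- what changed: Replaced the newline-split + per-line lstrip + separate newline-count passes with a single left-to-right character scan keeping an in_leading flag, computing all three counts in one traversal without building intermediate lists.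
import Mathlib
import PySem

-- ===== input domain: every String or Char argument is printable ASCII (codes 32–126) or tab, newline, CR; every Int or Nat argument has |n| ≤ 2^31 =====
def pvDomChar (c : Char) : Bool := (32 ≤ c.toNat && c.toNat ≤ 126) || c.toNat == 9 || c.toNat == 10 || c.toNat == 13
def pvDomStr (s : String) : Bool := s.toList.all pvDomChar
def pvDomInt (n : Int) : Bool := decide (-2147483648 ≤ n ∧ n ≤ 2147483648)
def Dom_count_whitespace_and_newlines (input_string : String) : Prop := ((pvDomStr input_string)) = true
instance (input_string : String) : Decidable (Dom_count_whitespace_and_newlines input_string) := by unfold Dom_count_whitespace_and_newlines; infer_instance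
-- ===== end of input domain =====

-- B replaces A's split('\n') + per-line lstrip + separate count('\n') passes with one single left-to-right scan carrying an in_leading flag.

-- ===== PORT A =====
def count_whitespace_and_newlines (input_string : String) : Int × Int × Int :=
  let lines := PySem.Chars.splitOn input_string.toList ['\n']
  let p : Int × Int := lines.foldl (fun (p : Int × Int) line =>
      let leading_whitespace : Int := (line.length : Int) - ((PySem.Chars.lstrip line).length : Int)
      let indent := p.1 + leading_whitespace
      let cleaned_line := PySem.Chars.lstrip line
      let ws := cleaned_line.foldl (fun w c => if c = ' ' ∨ c = '\t' then w + 1 else w) p.2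
      (indent, ws)) (0, 0)
  (p.1, p.2, (PySem.Chars.count input_string.toList ['\n'] : Int))

-- ===== PORT B =====
-- single pass; lead = Python's in_leading flag
def bGo : List Char → Bool → Int → Int → Int → Int × Int × Int
  | [], _, i, w, n => (i, w, n)
  | c :: cs, lead, i, w, n =>
    if c = '\n' then bGo cs true i w (n + 1)
    else if lead && PySem.Chars.isspace c then bGo cs true (i + 1) w n
    else bGo cs false i (if c = ' ' ∨ c = '\t' then w + 1 else w) n

def count_whitespace_and_newlines_alt (input_string : String) : Int × Int × Int :=
  bGo input_string.toList true 0 0 0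

-- ===== PRECONDITION & SPEC =====
def Spec_count_whitespace_and_newlines (input_string : String) (out : Int × Int × Int) : Prop := out = count_whitespace_and_newlines_alt input_string
instance (input_string : String) (out : Int × Int × Int) : Decidable (Spec_count_whitespace_and_newlines input_string out) := by unfold Spec_count_whitespace_and_newlines; infer_instance

-- ===== CLAIM (what is proved, stated in full; the proofs are below) =====
def Claim_equal_count_whitespace_and_newlines : Prop := ∀ (input_string : String), Dom_count_whitespace_and_newlines input_string → Spec_count_whitespace_and_newlines input_string (count_whitespace_and_newlines input_string)

-- ===== LEMMAS AND PROOFS =====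

theorem triple_ext {a b c d e f : Int} (h1 : a = d) (h2 : b = e) (h3 : c = f) :
    ((a, b, c) : Int × Int × Int) = (d, e, f) := by subst h1 h2 h3; rfl

-- structural characterisation of Python's s.split('\n')
def splitNL : List Char → List (List Char)
  | [] => [[]]
  | c :: cs => if c = '\n' then [] :: splitNL cs
               else match splitNL cs with
                    | [] => [[c]]
                    | l :: ls => (c :: l) :: ls

def mapHead (f : List Char → List Char) : List (List Char) → List (List Char)
  | [] => []
  | l :: ls => f l :: ls

theorem splitNL_ne_nil (cs : List Char) : splitNL cs ≠ [] := by
  cases cs with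
  | nil => simp [splitNL]
  | cons c cs =>
    simp only [splitNL]
    split
    · simp
    · split <;> simp

theorem go_spec (cs : List Char) : ∀ (fuel : Nat) (cur : List Char) (acc : List (List Char)),
    cs.length < fuel →
    PySem.Chars.splitOn.go ['\n'] fuel cs cur acc
      = acc.reverse ++ mapHead (fun l => cur.reverse ++ l) (splitNL cs) := by
  induction cs with
  | nil =>
    intro fuel cur acc h
    cases fuel with
    | zero => omega
    | succ f => simp [PySem.Chars.splitOn.go, splitNL, mapHead]
  | cons c cs ih =>
    intro fuel cur acc h
    cases fuel with
    | zero => simp at h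
    | succ f =>
      rw [PySem.Chars.splitOn.go]
      by_cases hc : c = '\n'
      · subst hc
        have hpre : List.isPrefixOf ['\n'] ('\n' :: cs) = true := by simp
        simp only [hpre, if_true, List.length_cons, List.drop_succ_cons, List.length_nil, List.drop_zero]
        rw [ih f [] _ (by simpa using h)]
        simp only [splitNL, if_true, List.reverse_nil, List.nil_append]
        cases splitNL cs <;> simp [mapHead]
      · have hpre : List.isPrefixOf ['\n'] (c :: cs) = false := by
          simpa [List.isPrefixOf] using fun h => hc h.symm
        simp only [hpre, Bool.false_eq_true, if_false]
        rw [ih f (c :: cur) acc (by simp at h ⊢; omega)]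
        have := splitNL_ne_nil cs
        simp only [splitNL, hc, if_false]
        cases hs : splitNL cs with
        | nil => exact absurd hs this
        | cons l ls => simp [mapHead]

theorem splitOn_eq_splitNL (cs : List Char) : PySem.Chars.splitOn cs ['\n'] = splitNL cs := by
  rw [PySem.Chars.splitOn, go_spec cs (cs.length + 1) [] [] (by omega)]
  have := splitNL_ne_nil cs
  cases hs : splitNL cs with
  | nil => exact absurd hs this
  | cons l ls => simp [mapHead]

theorem count_go_spec (cs : List Char) : ∀ (fuel : Nat) (acc : Nat), cs.length ≤ fuel →
    PySem.Chars.count.go ['\n'] fuel cs acc = acc + cs.count '\n' := by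
  induction cs with
  | nil => intro fuel acc h; cases fuel <;> simp [PySem.Chars.count.go]
  | cons c cs ih =>
    intro fuel acc h
    cases fuel with
    | zero => simp at h
    | succ f =>
      rw [PySem.Chars.count.go]
      by_cases hc : c = '\n'
      · subst hc
        have hpre : List.isPrefixOf ['\n'] ('\n' :: cs) = true := by simp
        simp only [hpre, if_true, List.length_cons, List.drop_succ_cons, List.length_nil, List.drop_zero]
        rw [ih f (acc+1) (by simp at h; omega)]
        simp [List.count_cons]
        omega
      · have hpre : List.isPrefixOf ['\n'] (c :: cs) = false := by
          simpa [List.isPrefixOf] using fun h => hc h.symm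
        simp only [hpre, Bool.false_eq_true, if_false]
        rw [ih f acc (by simp at h; omega)]
        simp [List.count_cons, hc]

theorem count_eq_listCount (cs : List Char) : PySem.Chars.count cs ['\n'] = cs.count '\n' := by
  rw [PySem.Chars.count]
  simp [count_go_spec cs cs.length 0 (le_refl _)]

-- per-line quantities of A
def spaceTab (c : Char) : Bool := decide (c = ' ' ∨ c = '\t')

def leadOf (l : List Char) : Int := (l.length : Int) - ((PySem.Chars.lstrip l).length : Int)

def wsLine (l : List Char) : Int := ((PySem.Chars.lstrip l).countP spaceTab : Int)

def wsWhole (l : List Char) : Int := (l.countP spaceTab : Int)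

def indSum (ls : List (List Char)) : Int := (ls.map leadOf).sum

def wsSum (ls : List (List Char)) : Int := (ls.map wsLine).sum

theorem pairFold (lines : List (List Char)) : ∀ (i w : Int),
    lines.foldl (fun (p : Int × Int) line =>
      let leading_whitespace : Int := (line.length : Int) - ((PySem.Chars.lstrip line).length : Int)
      let indent := p.1 + leading_whitespace
      let cleaned_line := PySem.Chars.lstrip line
      let ws := cleaned_line.foldl (fun w c => if c = ' ' ∨ c = '\t' then w + 1 else w) p.2
      (indent, ws)) (i, w)
    = (i + indSum lines, w + wsSum lines) := by
  induction lines with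
  | nil => intro i w; simp [indSum, wsSum]
  | cons l ls ih =>
    intro i w
    simp only [List.foldl_cons]
    rw [PySem.List.foldl_ite_add_one]
    rw [ih]
    simp only [indSum, wsSum, List.map_cons, List.sum_cons, Prod.mk.injEq]
    have hsp : (fun x : Char => decide (x = ' ' ∨ x = '\t')) = spaceTab := rfl
    rw [hsp]
    constructor
    · simp only [leadOf]; ring
    · simp only [wsLine]; ring

theorem isspace_of_spaceTab {c : Char} (h : spaceTab c = true) : PySem.Chars.isspace c = true := by
  simp [spaceTab] at h
  rcases h with h | h <;> subst h <;> decide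

theorem lstrip_cons_of_isspace {c : Char} (cs : List Char) (h : PySem.Chars.isspace c = true) :
    PySem.Chars.lstrip (c :: cs) = PySem.Chars.lstrip cs := by
  simp [PySem.Chars.lstrip, List.dropWhile_cons, h]

theorem lstrip_cons_of_not_isspace {c : Char} (cs : List Char) (h : ¬ PySem.Chars.isspace c = true) :
    PySem.Chars.lstrip (c :: cs) = c :: cs := by
  simp [PySem.Chars.lstrip, List.dropWhile_cons, h]

-- the single-pass loop, in both flag states, expressed through A's per-line sums
theorem bGo_spec (cs : List Char) : ∀ (i w n : Int),
    (bGo cs true i w n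
      = (i + indSum (splitNL cs), w + wsSum (splitNL cs), n + (cs.count '\n' : Int)))
    ∧ (bGo cs false i w n
      = (i + indSum (splitNL cs).tail,
         w + wsWhole ((splitNL cs).headI) + wsSum (splitNL cs).tail,
         n + (cs.count '\n' : Int))) := by
  induction cs with
  | nil =>
    intro i w n
    simp [bGo, splitNL, indSum, wsSum, wsWhole, leadOf, wsLine, PySem.Chars.lstrip]
  | cons c cs ih =>
    intro i w n
    obtain ⟨L, Ls, hs⟩ : ∃ L Ls, splitNL cs = L :: Ls := by
      have := splitNL_ne_nil cs
      cases h : splitNL cs with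
      | nil => exact absurd h this
      | cons L Ls => exact ⟨L, Ls, rfl⟩
    by_cases hc : c = '\n'
    · subst hc
      have hcnt : (List.count '\n' ('\n' :: cs) : Int) = (List.count '\n' cs : Int) + 1 := by
        rw [List.count_cons_self]; push_cast; ring
      constructor
      · show bGo ('\n' :: cs) true i w n = _
        rw [bGo]
        simp only [if_true]
        rw [(ih i w (n+1)).1]
        simp only [splitNL, if_true, indSum, wsSum, List.map_cons, List.sum_cons]
        rw [hcnt]
        refine triple_ext ?_ ?_ (by ring)
        · simp [leadOf, PySem.Chars.lstrip] <;> ring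
        · simp [wsLine, PySem.Chars.lstrip] <;> ring
      · show bGo ('\n' :: cs) false i w n = _
        rw [bGo]
        simp only [if_true]
        rw [(ih i w (n+1)).1]
        simp only [splitNL, if_true, List.tail_cons, List.headI]
        rw [hcnt]
        refine triple_ext (by ring) ?_ (by ring)
        simp [wsWhole]
    · have hcnt : (List.count '\n' (c :: cs) : Int) = (List.count '\n' cs : Int) := by
        rw [List.count_cons]; simp; exact hc
      have hsplit : splitNL (c :: cs) = (c :: L) :: Ls := by
        simp only [splitNL, hc, if_false, hs]
      have hfalse : bGo (c :: cs) false i w n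
          = (i + indSum (splitNL (c :: cs)).tail,
             w + wsWhole ((splitNL (c :: cs)).headI) + wsSum (splitNL (c :: cs)).tail,
             n + ((c :: cs).count '\n' : Int)) := by
        rw [bGo]
        simp only [hc, if_false, Bool.false_and, Bool.false_eq_true]
        rw [(ih i (if c = ' ' ∨ c = '\t' then w + 1 else w) n).2]
        rw [hsplit, hs, hcnt]
        simp only [List.tail_cons, List.headI]
        refine triple_ext (by ring) ?_ (by ring)
        simp only [wsWhole, List.countP_cons]
        by_cases hcw : c = ' ' ∨ c = '\t'
        · have hst : spaceTab c = true := by simp [spaceTab, hcw]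
          rw [if_pos hcw]
          simp [hst] <;> (push_cast; ring)
        · have hst : spaceTab c = false := by simp [spaceTab, hcw]
          rw [if_neg hcw]
          simp [hst] <;> (push_cast; ring)
      refine ⟨?_, hfalse⟩
      show bGo (c :: cs) true i w n = _
      by_cases hsp : PySem.Chars.isspace c = true
      · rw [bGo]
        simp only [hc, if_false, hsp, Bool.true_and, if_true]
        rw [(ih (i+1) w n).1]
        rw [hsplit, hs, hcnt]
        simp only [indSum, wsSum, List.map_cons, List.sum_cons]
        refine triple_ext ?_ ?_ (by ring)
        · simp only [leadOf, lstrip_cons_of_isspace L hsp, List.length_cons] <;> (push_cast; ring)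
        · simp only [wsLine, lstrip_cons_of_isspace L hsp] <;> ring
      · have hst : spaceTab c = false := by
          by_contra h
          simp only [Bool.not_eq_false] at h
          exact hsp (isspace_of_spaceTab h)
        have hcw : ¬ (c = ' ' ∨ c = '\t') := by simpa [spaceTab] using hst
        rw [bGo]
        simp only [hc, if_false, hsp, Bool.true_and, Bool.false_eq_true]
        rw [(ih i (if c = ' ' ∨ c = '\t' then w + 1 else w) n).2]
        rw [if_neg hcw, hsplit, hs, hcnt]
        simp only [indSum, wsSum, List.map_cons, List.sum_cons, List.tail_cons, List.headI]
        refine triple_ext ?_ ?_ (by ring)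
        · simp only [leadOf, lstrip_cons_of_not_isspace L hsp, List.length_cons] <;> (push_cast; ring)
        · simp only [wsLine, wsWhole, lstrip_cons_of_not_isspace L hsp, List.countP_cons, hst]
          simp <;> (push_cast; ring)

-- ===== VERDICT (by name: the statement is the Claim_ definition above) =====
theorem count_whitespace_and_newlines_spec : Claim_equal_count_whitespace_and_newlines := by
  intro s _
  unfold Spec_count_whitespace_and_newlines
  unfold count_whitespace_and_newlines count_whitespace_and_newlines_alt
  rw [splitOn_eq_splitNL, count_eq_listCount]
  rw [(bGo_spec s.toList 0 0 0).1]
  simp only [pairFold (splitNL s.toList) 0 0]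
  simp
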